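-- pv_equiv track=rewrite | github.com/luckyblyd/ppq_engine | bin/ElderRayStrategy.py | _resample_hourly
-- ===== SOURCE A (Python) =====
-- HOUR_SAMPLE_INTERVAL = 12  # 5分钟 * 12 = 60分钟
--
-- def _resample_hourly(history_5m, interval=HOUR_SAMPLE_INTERVAL):
--     """
--     从5分钟级别的历史数据中，每隔 interval 根取一个样本
--     模拟60分钟周期的数据序列
--     返回取样后的列表(从旧到新)
--     """
--     if not history_5m:
--         return []
--     n = len(history_5m)
--     # 从最新一根往前，以 interval 为步长取样，然后反转为时间正序
--     result = []
--     i = n - 1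
--     while i >= 0:
--         result.append(history_5m[i])
--         i -= interval
--     result.reverse()
--     return result
-- ===== SOURCE B (Python) =====
-- HOUR_SAMPLE_INTERVAL = 12  # 5 minutes * 12 = 60 minutes
--
-- def _resample_hourly(history_5m, interval=HOUR_SAMPLE_INTERVAL):
--     start = (len(history_5m) - 1) % interval
--     return [history_5m[i] for i in range(start, len(history_5m), interval)]
-- ===== Notes on version B (the rewrite author's own statement) =====
-- stated objective: simpler
-- what changed: Replaces the backward while-loop that accumulates from the newest bar and then reverses with a precomputed modular start offset and a single forward range scan in time order (no reverse, no explicit emptiness check).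
-- outside the precondition, e.g. on _resample_hourly([], 0): A returns [], B raises ZeroDivisionError
import Mathlib
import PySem

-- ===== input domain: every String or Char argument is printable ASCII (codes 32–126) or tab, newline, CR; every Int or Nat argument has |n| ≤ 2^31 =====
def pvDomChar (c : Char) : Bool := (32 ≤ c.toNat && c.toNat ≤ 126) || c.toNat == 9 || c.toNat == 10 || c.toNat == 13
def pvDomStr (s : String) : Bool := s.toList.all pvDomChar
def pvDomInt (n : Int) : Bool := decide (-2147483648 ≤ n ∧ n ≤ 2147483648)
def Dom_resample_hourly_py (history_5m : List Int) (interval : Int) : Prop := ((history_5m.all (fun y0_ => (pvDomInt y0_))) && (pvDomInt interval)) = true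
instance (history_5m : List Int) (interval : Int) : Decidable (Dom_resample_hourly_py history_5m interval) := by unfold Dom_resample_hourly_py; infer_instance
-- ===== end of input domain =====

-- B replaces A's backward accumulate-then-reverse loop with a precomputed modular
-- start offset and one forward range scan; objective: simpler.

-- ===== PORT A =====
-- the while-loop of A: i walks down from n-1 by interval, appending history_5m[i];
-- fuel (length+1) only makes the recursion total — with interval ≥ 1 it is never exhausted
def pvALoop (hist : List Int) (interval : Int) (i : Int) (acc : List Int) (fuel : Nat) : List Int :=
  match fuel with
  | 0 => acc
  | Nat.succ f =>
      if 0 ≤ i then pvALoop hist interval (i - interval) (acc ++ [PySem.List.pyGetD hist i 0]) f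
      else acc

def resample_hourly_py (history_5m : List Int) (interval : Int) : List Int :=
  if history_5m = [] then []
  else (pvALoop history_5m interval ((history_5m.length : Int) - 1) [] (history_5m.length + 1)).reverse

-- ===== PORT B =====
def resample_hourly_py_alt (history_5m : List Int) (interval : Int) : List Int :=
  let n : Int := (history_5m.length : Int)
  let start := PySem.Int.mod (n - 1) interval
  (PySem.List.pyRange start n interval).map (fun i => PySem.List.pyGetD history_5m i 0)

-- ===== PRECONDITION & SPEC =====
-- Pre_ excludes interval = 0 (Python B raises ZeroDivisionError; A returns [] only on the
-- empty list and otherwise loops forever) and interval < 0 on a nonempty list (A loops forever).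
def Pre_resample_hourly_py (history_5m : List Int) (interval : Int) : Prop :=
  interval ≠ 0 ∧ (history_5m = [] ∨ 1 ≤ interval)
instance (history_5m : List Int) (interval : Int) : Decidable (Pre_resample_hourly_py history_5m interval) := by unfold Pre_resample_hourly_py; infer_instance

def pvWitness_resample_hourly_py : List Int × Int := ([3, 1, 4, 1, 5, 9, 2, 6], 3)

def Spec_resample_hourly_py (history_5m : List Int) (interval : Int) (out : List Int) : Prop := out = resample_hourly_py_alt history_5m interval
instance (history_5m : List Int) (interval : Int) (out : List Int) : Decidable (Spec_resample_hourly_py history_5m interval out) := by unfold Spec_resample_hourly_py; infer_instance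

-- ===== CLAIM (what is proved, stated in full; the proofs are below) =====
def Claim_equal_resample_hourly_py : Prop := ∀ (history_5m : List Int) (interval : Int), Dom_resample_hourly_py history_5m interval → Pre_resample_hourly_py history_5m interval → Spec_resample_hourly_py history_5m interval (resample_hourly_py history_5m interval)

-- ===== LEMMAS AND PROOFS =====

-- accumulator of A's loop factors out
theorem pvALoop_acc (hist : List Int) (k : Int) :
    ∀ (f : Nat) (i : Int) (acc : List Int),
      pvALoop hist k i acc f = acc ++ pvALoop hist k i [] f := by
  intro f
  induction f with
  | zero => intro i acc; simp [pvALoop]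
  | succ f ih =>
      intro i acc
      by_cases h : 0 ≤ i
      · simp only [pvALoop, if_pos h]
        rw [ih (i - k) (acc ++ [PySem.List.pyGetD hist i 0]),
            ih (i - k) ([] ++ [PySem.List.pyGetD hist i 0])]
        simp
      · simp [pvALoop, h]

-- core: reversed backward collection from i = forward scan over the arithmetic range
theorem pvALoop_reverse (hist : List Int) (k : Int) (hk : 1 ≤ k) :
    ∀ (m : Nat) (i : Int), 0 ≤ i → i.toNat = m → ∀ (f : Nat), i < (f : Int) →
      (pvALoop hist k i [] f).reverse =
        (PySem.List.pyRange (PySem.Int.mod i k) (i + 1) k).map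
          (fun j => PySem.List.pyGetD hist j 0) := by
  intro m
  induction m using Nat.strong_induction_on with
  | _ m ih =>
    intro i hi him f hf
    obtain ⟨f, rfl⟩ : ∃ f', f = f' + 1 := ⟨f - 1, by omega⟩
    have hk0 : (0:Int) < k := by omega
    have hmod : PySem.Int.mod i k = i % k := PySem.Int.mod_eq_emod_of_pos hk0
    simp only [pvALoop, if_pos hi]
    rw [pvALoop_acc]
    by_cases hik : 0 ≤ i - k
    · -- recursive step: at least one more sample below i
      have hlt : (i - k).toNat < m := by omega
      have hrec := ih (i - k).toNat hlt (i - k) hik rfl f (by push_cast at hf ⊢; omega)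
      simp only [List.reverse_append, hrec]
      have hmod2 : PySem.Int.mod (i - k) k = i % k := by
        rw [PySem.Int.mod_eq_emod_of_pos hk0, Int.sub_emod_right]
      rw [hmod, hmod2]
      -- name the quotient q and remainder r of i by k
      obtain ⟨q, hq⟩ : ∃ q, i / k = q := ⟨_, rfl⟩
      obtain ⟨r, hr⟩ : ∃ r, i % k = r := ⟨_, rfl⟩
      have hqk : r + k * q = i := by rw [← hq, ← hr]; exact Int.emod_add_mul_ediv i k
      have hr0 : 0 ≤ r := hr ▸ Int.emod_nonneg i (by omega)
      have hrk : r < k := hr ▸ Int.emod_lt_of_pos i hk0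
      have hq0 : 0 ≤ q := hq ▸ Int.ediv_nonneg hi (le_of_lt hk0)
      have hq1 : 1 ≤ q := by
        by_contra hcon
        have h0 : q = 0 := by omega
        subst h0
        simp only [mul_zero, add_zero] at hqk
        omega
      have hkq : k ≤ k * q := le_mul_of_one_le_right (le_of_lt hk0) hq1
      rw [hr]
      -- split the range: pyRange r (i+1) k = pyRange r (i-k+1) k ++ [i]
      have hsplit : PySem.List.pyRange r (i + 1) k
          = PySem.List.pyRange r (i - k + 1) k ++ [i] := by
        rw [PySem.List.pyRange_of_pos _ _ hk0, PySem.List.pyRange_of_pos _ _ hk0]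
        have h1 : r < i + 1 := by linarith
        have h2 : r < i - k + 1 := by linarith
        rw [if_pos h1, if_pos h2]
        have e1 : (i + 1 - r + k - 1) / k = q + 1 := by
          have e : i + 1 - r + k - 1 = (q + 1) * k := by rw [← hqk]; ring
          rw [e, Int.mul_ediv_cancel _ (by omega)]
        have e2 : (i - k + 1 - r + k - 1) / k = q := by
          have e : i - k + 1 - r + k - 1 = q * k := by rw [← hqk]; ring
          rw [e, Int.mul_ediv_cancel _ (by omega)]
        rw [e1, e2]
        have e3 : (q + 1).toNat = q.toNat + 1 := by omega
        rw [e3, List.range_succ, List.map_append]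
        congr 1
        simp only [List.map_cons, List.map_nil]
        congr 1
        have e4 : (q.toNat : Int) = q := by omega
        rw [e4]; linarith
      rw [hsplit, List.map_append]
      simp
    · -- last step: i - k < 0, loop ends after this sample
      have hstop : pvALoop hist k (i - k) [] f = [] := by
        cases f with
        | zero => rfl
        | succ f' =>
            simp only [pvALoop]
            rw [if_neg (by omega : ¬ (0:Int) ≤ i - k)]
      rw [hstop]
      have hie : i % k = i := Int.emod_eq_of_lt hi (by omega)
      rw [hmod, hie, PySem.List.pyRange_of_pos _ _ hk0, if_pos (by omega : i < i + 1)]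
      have e : (i + 1 - i + k - 1) / k = 1 := by
        have e' : i + 1 - i + k - 1 = 1 * k := by ring
        rw [e', Int.mul_ediv_cancel _ (by omega)]
      rw [e]
      simp

-- empty history: B's forward range is empty for every nonzero interval
theorem pv_rangenil (k : Int) (hk : k ≠ 0) :
    PySem.List.pyRange (PySem.Int.mod (0 - 1) k) 0 k = [] := by
  unfold PySem.List.pyRange
  rcases lt_or_gt_of_ne hk with hneg | hpos
  · have hb := PySem.Int.mod_neg_bounds ((0:Int) - 1) hneg
    rw [if_neg hk, if_neg (by omega : ¬ (0:Int) < k),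
        if_neg (by omega : ¬ (0:Int) < PySem.Int.mod ((0:Int) - 1) k)]
    rfl
  · have hnn := PySem.Int.mod_nonneg ((0:Int) - 1) hpos
    rw [if_neg hk, if_pos hpos,
        if_neg (by omega : ¬ PySem.Int.mod ((0:Int) - 1) k < 0)]
    rfl

theorem pv_alt_nil (k : Int) (hk : k ≠ 0) : resample_hourly_py_alt [] k = [] := by
  unfold resample_hourly_py_alt
  simp only [List.length_nil, Int.natCast_zero]
  rw [pv_rangenil k hk]
  rfl

-- ===== VERDICT (by name: the statement is the Claim_ definition above) =====
theorem resample_hourly_py_spec : Claim_equal_resample_hourly_py := by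
  intro hist k _ hpre
  obtain ⟨hk0, hcase⟩ := hpre
  unfold Spec_resample_hourly_py resample_hourly_py
  by_cases hnil : hist = []
  · rw [if_pos hnil, hnil, pv_alt_nil k hk0]
  · rw [if_neg hnil]
    have hk1 : 1 ≤ k := by
      rcases hcase with h | h
      · exact absurd h hnil
      · exact h
    have hlen : 1 ≤ hist.length := List.length_pos_iff.mpr hnil
    have h := pvALoop_reverse hist k hk1 ((hist.length : Int) - 1).toNat
      ((hist.length : Int) - 1) (by omega) rfl (hist.length + 1) (by push_cast; omega)
    rw [h, show ((hist.length : Int) - 1) + 1 = (hist.length : Int) from by omega]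
    rfl
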